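-- pv_equiv track=rewrite | github.com/simayysanli/Senior_Project_CS_2019 | dataset_preprocess.py | create_file_names
-- ===== SOURCE A (Python) =====
-- def create_file_names(repo_dir, ds_name, process_labels, extension):
--     file_names = []
--     cum_p_labels = ['[%s]' % process_labels[0]]  # Cumulative Process Labels
--     for i in range(1, len(process_labels)):
--         cum_p_labels.append('%s[%s]' % (cum_p_labels[i - 1], process_labels[i]))
--
--     for label in cum_p_labels:
--         file_names.append(repo_dir + ds_name + label + extension)
--
--     return file_names
-- ===== SOURCE B (Python) =====
-- def create_file_names(repo_dir, ds_name, process_labels, extension):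
--     file_names = []
--     label = ''
--     for p in process_labels:
--         label = '%s[%s]' % (label, p)
--         file_names.append(repo_dir + ds_name + label + extension)
--     return file_names
-- ===== Notes on version B (the rewrite author's own statement) =====
-- stated objective: simpler
-- what changed: Fuses A's two passes (build the cumulative-label list, then map it to file names) into a single loop maintaining one running label string, never materialising the intermediate cum_p_labels list.
import Mathlib
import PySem

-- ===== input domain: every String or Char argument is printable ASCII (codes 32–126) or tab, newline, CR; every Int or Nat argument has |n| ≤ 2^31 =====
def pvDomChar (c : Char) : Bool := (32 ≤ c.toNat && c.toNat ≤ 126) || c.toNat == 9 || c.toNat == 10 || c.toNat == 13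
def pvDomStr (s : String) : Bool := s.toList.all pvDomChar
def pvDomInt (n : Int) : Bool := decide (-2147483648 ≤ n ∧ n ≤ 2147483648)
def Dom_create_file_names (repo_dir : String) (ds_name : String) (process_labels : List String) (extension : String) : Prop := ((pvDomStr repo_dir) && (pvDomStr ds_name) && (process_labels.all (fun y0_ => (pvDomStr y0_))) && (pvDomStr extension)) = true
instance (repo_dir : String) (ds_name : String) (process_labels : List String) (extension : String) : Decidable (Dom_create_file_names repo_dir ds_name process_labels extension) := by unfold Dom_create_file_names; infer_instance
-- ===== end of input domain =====

-- B fuses A's two passes into one loop maintaining a single running label string (objective: simpler).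

-- ===== PORT A =====
def create_file_names (repo_dir : String) (ds_name : String) (process_labels : List String) (extension : String) : List String :=
  -- cum_p_labels = ['[%s]' % process_labels[0]]  (process_labels[0] raises on []; Pre_ excludes that)
  let cum0 : List String := ["[" ++ PySem.List.pyGetD process_labels 0 "" ++ "]"]
  -- for i in range(1, len(process_labels)): cum_p_labels.append('%s[%s]' % (cum_p_labels[i-1], process_labels[i]))
  let cum := (PySem.List.pyRange 1 (process_labels.length : Int) 1).foldl
    (fun acc i =>
      acc ++ [PySem.List.pyGetD acc (i - 1) "" ++ "[" ++ PySem.List.pyGetD process_labels i "" ++ "]"])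
    cum0
  -- for label in cum_p_labels: file_names.append(repo_dir + ds_name + label + extension)
  cum.foldl (fun fns label => fns ++ [repo_dir ++ ds_name ++ label ++ extension]) []

-- ===== PORT B =====
def create_file_names_alt (repo_dir : String) (ds_name : String) (process_labels : List String) (extension : String) : List String :=
  (process_labels.foldl
    (fun (st : List String × String) p =>
      let label := st.2 ++ "[" ++ p ++ "]"
      (st.1 ++ [repo_dir ++ ds_name ++ label ++ extension], label))
    ([], "")).1

-- ===== PRECONDITION & SPEC =====
-- Pre_ excludes only the empty process_labels list, on which A raises IndexError at process_labels[0].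
def Pre_create_file_names (repo_dir : String) (ds_name : String) (process_labels : List String) (extension : String) : Prop :=
  process_labels ≠ []
instance (repo_dir : String) (ds_name : String) (process_labels : List String) (extension : String) : Decidable (Pre_create_file_names repo_dir ds_name process_labels extension) := by unfold Pre_create_file_names; infer_instance

def pvWitness_create_file_names : String × String × List String × String := ("r/", "ds", ["p1", "p2"], ".csv")

def Spec_create_file_names (repo_dir : String) (ds_name : String) (process_labels : List String) (extension : String) (out : List String) : Prop := out = create_file_names_alt repo_dir ds_name process_labels extension
instance (repo_dir : String) (ds_name : String) (process_labels : List String) (extension : String) (out : List String) : Decidable (Spec_create_file_names repo_dir ds_name process_labels extension out) := by unfold Spec_create_file_names; infer_instance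

-- ===== CLAIM (what is proved, stated in full; the proofs are below) =====
def Claim_equal_create_file_names : Prop := ∀ (repo_dir : String) (ds_name : String) (process_labels : List String) (extension : String), Dom_create_file_names repo_dir ds_name process_labels extension → Pre_create_file_names repo_dir ds_name process_labels extension → Spec_create_file_names repo_dir ds_name process_labels extension (create_file_names repo_dir ds_name process_labels extension)

-- ===== LEMMAS AND PROOFS =====

-- the sequence of cumulative labels continuing from a running label L
def cumFrom (L : String) : List String → List String
  | [] => []
  | p :: rest => (L ++ "[" ++ p ++ "]") :: cumFrom (L ++ "[" ++ p ++ "]") rest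

-- A's second loop is "map and append"
theorem foldl_append_map (f : String → String) :
    ∀ (xs : List String) (init : List String),
    xs.foldl (fun fns label => fns ++ [f label]) init = init ++ xs.map f := by
  intro xs
  induction xs with
  | nil => simp
  | cons x xs ih => intro init; simp [List.foldl_cons, ih]

-- A's first loop, from index k with accumulator acc whose last element is L
theorem A_loop (xs : List String) :
    ∀ (n k : Nat) (acc : List String) (L : String),
      xs.length = k + n → acc.length = k → acc.getLast? = some L →
      (PySem.List.pyRange (k : Int) (xs.length : Int) 1).foldl
        (fun acc i =>
          acc ++ [PySem.List.pyGetD acc (i - 1) "" ++ "[" ++ PySem.List.pyGetD xs i "" ++ "]"])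
        acc
      = acc ++ cumFrom L (xs.drop k) := by
  intro n
  induction n with
  | zero =>
    intro k acc L hxs hk _
    rw [PySem.List.pyRange_one_eq_nil (by exact_mod_cast (by omega : xs.length ≤ k))]
    have hd : xs.drop k = [] := List.drop_eq_nil_of_le (by omega)
    rw [hd]
    simp [cumFrom]
  | succ n ih =>
    intro k acc L hxs hk hlast
    have hkpos : 0 < k := by
      rcases acc with _ | _
      · simp at hlast
      · simp at hk; omega
    rw [PySem.List.pyRange_one_cons (by exact_mod_cast (by omega : (k:Int) < xs.length))]
    rw [List.foldl_cons]
    have hxk : ∃ p rest, xs.drop k = p :: rest := by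
      have : k < xs.length := by omega
      exact ⟨xs[k], xs.drop (k+1), by rw [List.drop_eq_getElem_cons this]⟩
    obtain ⟨p, rest, hdrop⟩ := hxk
    have hget_xs : PySem.List.pyGetD xs (k : Int) "" = p := by
      have hk' : k < xs.length := by omega
      have := List.drop_eq_getElem_cons hk' (l := xs)
      rw [hdrop] at this
      have hp : xs[k] = p := by injection this.symm
      rw [PySem.List.pyGetD_natCast, List.getD_eq_getElem _ _ hk', hp]
    have hget_acc : PySem.List.pyGetD acc ((k : Int) - 1) "" = L := by
      have h1 : ((k : Int) - 1) = ((k - 1 : Nat) : Int) := by omega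
      rw [h1, PySem.List.pyGetD_natCast]
      have hlt : k - 1 < acc.length := by omega
      rw [List.getD_eq_getElem _ _ hlt]
      have h2 : acc.length - 1 = k - 1 := by omega
      rw [List.getLast?_eq_getElem?, h2, List.getElem?_eq_getElem hlt] at hlast
      injection hlast
    rw [hget_xs, hget_acc]
    have hstep := ih (k + 1) (acc ++ [L ++ "[" ++ p ++ "]"]) (L ++ "[" ++ p ++ "]")
      (by omega) (by simp [hk]) (by simp)
    have hcast : ((k : Int) + 1) = ((k + 1 : Nat) : Int) := by omega
    rw [hcast, hstep]
    have hdrop1 : xs.drop (k + 1) = rest := by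
      rw [← List.tail_drop, hdrop]
      rfl
    rw [hdrop1, hdrop, cumFrom]
    simp

-- B's loop in terms of cumFrom
theorem B_loop (repo_dir ds_name extension : String) :
    ∀ (xs : List String) (out : List String) (L : String),
      (xs.foldl
        (fun (st : List String × String) p =>
          let label := st.2 ++ "[" ++ p ++ "]"
          (st.1 ++ [repo_dir ++ ds_name ++ label ++ extension], label))
        (out, L)).1
      = out ++ (cumFrom L xs).map (fun label => repo_dir ++ ds_name ++ label ++ extension) := by
  intro xs
  induction xs with
  | nil => intro out L; simp [cumFrom]
  | cons p xs ih => intro out L; simp only [List.foldl_cons, cumFrom, List.map_cons, ih]; simp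

-- ===== VERDICT (by name: the statement is the Claim_ definition above) =====
theorem create_file_names_spec : Claim_equal_create_file_names := by
  intro repo_dir ds_name process_labels extension _ hpre
  unfold Spec_create_file_names create_file_names create_file_names_alt
  rcases process_labels with _ | ⟨p0, rest⟩
  · exact absurd rfl hpre
  · simp only []
    have h0 : PySem.List.pyGetD (p0 :: rest) 0 "" = p0 := by
      rw [show (0:Int) = ((0:Nat):Int) from rfl, PySem.List.pyGetD_natCast]
      rfl
    rw [h0]
    have hA := A_loop (p0 :: rest) rest.length 1 ["[" ++ p0 ++ "]"] ("[" ++ p0 ++ "]")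
      (by simp [Nat.add_comm]) (by simp) (by simp)
    simp only [Nat.cast_one] at hA
    rw [hA]
    rw [foldl_append_map]
    rw [List.foldl_cons]
    have hB := B_loop repo_dir ds_name extension rest
      [repo_dir ++ ds_name ++ ("" ++ "[" ++ p0 ++ "]") ++ extension] ("" ++ "[" ++ p0 ++ "]")
    simp only [List.nil_append] at hB ⊢
    rw [hB]
    simp
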